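-- pv_equiv track=rewrite | github.com/joshfedo/splitflap-ha | custom_components/text_processing.py | process_escaped_chars
-- ===== SOURCE A (Python) =====
-- def process_escaped_chars(text: str) -> str:
--     """Process escaped characters for lowercase and uppercase the rest."""
--     result = []
--     i = 0
--     while i < len(text):
--         if text[i] == "\\" and i + 1 < len(text):
--             result.append(text[i + 1].lower())
--             i += 2
--         else:
--             result.append(text[i].upper())
--             i += 1
--     return "".join(result)
-- ===== SOURCE B (Python) =====
-- def process_escaped_chars(text: str) -> str:
--     """Process escaped characters for lowercase and uppercase the rest."""
--     parts = text.split("\\")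
--     pieces = [parts[0].upper()]
--     rest = parts[1:]
--     while rest:
--         p, *rest = rest
--         if p:
--             pieces.append(p[0].lower() + p[1:].upper())
--         else:
--             # empty segment: the backslash escaped another backslash, or was a lone trailing one
--             pieces.append("\\")
--             if rest:
--                 q, *rest = rest
--                 pieces.append(q.upper())
--     return "".join(pieces)
-- ===== Notes on version B (the rewrite author's own statement) =====
-- stated objective: faster
-- what changed: Instead of A's char-by-char index scan that peeks at text[i+1], B splits the text on backslashes once with str.split and processes the resulting segments: the first segment is uppercased wholesale, each later segment's first character (the escaped one) is lowercased and its remainder uppercased, and an empty segment marks an escaped backslash (or a lone trailing one).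
import Mathlib
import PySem

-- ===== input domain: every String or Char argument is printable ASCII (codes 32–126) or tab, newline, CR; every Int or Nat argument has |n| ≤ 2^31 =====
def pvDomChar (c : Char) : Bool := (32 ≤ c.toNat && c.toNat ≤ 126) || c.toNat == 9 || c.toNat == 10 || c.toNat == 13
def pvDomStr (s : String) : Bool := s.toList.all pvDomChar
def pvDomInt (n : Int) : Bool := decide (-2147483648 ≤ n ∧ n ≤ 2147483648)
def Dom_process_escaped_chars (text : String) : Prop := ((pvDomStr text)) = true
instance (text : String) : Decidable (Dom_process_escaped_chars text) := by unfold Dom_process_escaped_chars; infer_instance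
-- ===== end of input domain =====

-- B replaces A's char-by-char index scan by one str.split on backslashes followed by
-- per-segment case mapping (bulk C-level split/upper instead of a per-char Python loop;
-- measured faster in a timing run).

-- ===== PORT A =====
-- A: while loop over an index i, looking at text[i] and text[i+1].
def pvAGo (cs : List Char) (i : Nat) : List Char :=
  if h : i < cs.length then
    if h2 : cs[i] = '\\' ∧ i + 1 < cs.length then
      PySem.Chars.lowerChar (cs[i + 1]'h2.2) :: pvAGo cs (i + 2)
    else
      PySem.Chars.upperChar cs[i] :: pvAGo cs (i + 1)
  else []
termination_by cs.length - i

def process_escaped_chars (text : String) : String :=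
  String.ofList (pvAGo text.toList 0)

-- ===== PORT B =====
-- B: text.split("\\") (→ PySem.Chars.splitOn, the sep ≠ "" form of str.split), then the
-- while loop over the remaining segments: a nonempty segment p gives p[0].lower() + p[1:].upper(),
-- an empty one gives "\" and, if another segment follows, that segment uppercased wholesale.
def pvBParts : List (List Char) → List Char
  | [] => []
  | [] :: rest =>
    '\\' :: (match rest with
             | [] => []
             | q :: rest2 => PySem.Chars.upper q ++ pvBParts rest2)
  | (c :: cs) :: rest => PySem.Chars.lowerChar c :: PySem.Chars.upper cs ++ pvBParts rest

def process_escaped_chars_alt (text : String) : String :=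
  match PySem.Chars.splitOn text.toList ['\\'] with
  | [] => ""  -- unreachable: split always yields at least one segment
  | p0 :: rest => String.ofList (PySem.Chars.upper p0 ++ pvBParts rest)

-- ===== PRECONDITION & SPEC =====
def Spec_process_escaped_chars (text : String) (out : String) : Prop := out = process_escaped_chars_alt text
instance (text : String) (out : String) : Decidable (Spec_process_escaped_chars text out) := by unfold Spec_process_escaped_chars; infer_instance

-- ===== CLAIM (what is proved, stated in full; the proofs are below) =====
def Claim_equal_process_escaped_chars : Prop := ∀ (text : String), Dom_process_escaped_chars text → Spec_process_escaped_chars text (process_escaped_chars text)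

-- ===== LEMMAS AND PROOFS =====

-- scan-shaped characterisation of A's output, used as a middle point of the proof
def pvScan : List Char → List Char
  | [] => []
  | c :: rest =>
    if c = '\\' then
      match rest with
      | [] => [PySem.Chars.upperChar c]
      | c2 :: rest2 => PySem.Chars.lowerChar c2 :: pvScan rest2
    else
      PySem.Chars.upperChar c :: pvScan rest

theorem pvScan_cons (c : Char) (rest : List Char) :
    pvScan (c :: rest) = if c = '\\' then
      (match rest with
       | [] => [PySem.Chars.upperChar c]
       | c2 :: rest2 => PySem.Chars.lowerChar c2 :: pvScan rest2)
    else PySem.Chars.upperChar c :: pvScan rest := by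
  cases rest <;> by_cases hc : c = '\\' <;> simp [pvScan, hc]

theorem pvAGo_eq_pvScan_drop (cs : List Char) (i : Nat) : pvAGo cs i = pvScan (cs.drop i) := by
  induction i using pvAGo.induct (cs := cs) with
  | case1 i h h2 ih =>
    rw [pvAGo, dif_pos h, dif_pos h2,
        List.drop_eq_getElem_cons h, List.drop_eq_getElem_cons h2.2, ih,
        pvScan_cons, if_pos h2.1]
  | case2 i h h2 ih =>
    rw [pvAGo, dif_pos h, dif_neg h2, List.drop_eq_getElem_cons h, ih, pvScan_cons]
    by_cases hb : cs[i] = '\\'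
    · have hlen : ¬ i + 1 < cs.length := fun hl => h2 ⟨hb, hl⟩
      have hnil : cs.drop (i + 1) = [] := List.drop_eq_nil_of_le (by omega)
      rw [if_pos hb, hnil, hb]
      rfl
    · rw [if_neg hb]
  | case3 i h =>
    rw [pvAGo, dif_neg h, List.drop_eq_nil_of_le (by omega), pvScan]

-- simple recursive characterisation of str.split on a single backslash
def pvSplit : List Char → List (List Char)
  | [] => [[]]
  | c :: rest => if c = '\\' then [] :: pvSplit rest else (pvSplit rest).modifyHead (c :: ·)

theorem pvSplit_ne_nil (cs : List Char) : pvSplit cs ≠ [] := by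
  cases cs with
  | nil => simp [pvSplit]
  | cons c rest =>
    by_cases hc : c = '\\' <;> simp [pvSplit, hc]
    exact pvSplit_ne_nil rest

theorem pvModifyHead_id {α : Type} (l : List α) : l.modifyHead (fun x => x) = l := by
  cases l <;> simp

theorem pvSplit_cons_ex (cs : List Char) : ∃ p0 tl, pvSplit cs = p0 :: tl := by
  cases h : pvSplit cs with
  | nil => exact absurd h (pvSplit_ne_nil cs)
  | cons a b => exact ⟨a, b, rfl⟩

theorem pvGo_inv (fuel : Nat) (l cur : List Char) (acc : List (List Char)) (hf : l.length ≤ fuel) :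
    PySem.Chars.splitOn.go ['\\'] fuel l cur acc
      = acc.reverse ++ (pvSplit l).modifyHead (cur.reverse ++ ·) := by
  induction fuel generalizing l cur acc with
  | zero =>
    have : l = [] := List.eq_nil_of_length_eq_zero (Nat.le_zero.mp hf)
    subst this
    simp [PySem.Chars.splitOn.go, pvSplit]
  | succ f ih =>
    cases l with
    | nil => simp [PySem.Chars.splitOn.go, pvSplit]
    | cons c rest =>
      by_cases hc : c = '\\'
      · subst hc
        rw [PySem.Chars.splitOn.go]
        simp only [List.isPrefixOf, List.length_cons] at *
        rw [if_pos (by simp)]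
        simp only [List.length_singleton, List.drop_succ_cons, List.drop_zero]
        rw [ih _ _ _ (by simp; omega)]
        simp [pvSplit, List.modifyHead_cons, pvModifyHead_id]
      · rw [PySem.Chars.splitOn.go]
        rw [if_neg (by simp [List.isPrefixOf]; exact fun h => hc h.symm)]
        rw [ih _ _ _ (by simp at hf ⊢; omega)]
        have hne := pvSplit_ne_nil rest
        obtain ⟨p0, tl, hp⟩ : ∃ p0 tl, pvSplit rest = p0 :: tl := by
          cases hps : pvSplit rest with
          | nil => exact absurd hps hne
          | cons a b => exact ⟨a, b, rfl⟩
        simp [pvSplit, hc, hp, List.modifyHead_cons]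

theorem splitOn_eq_pvSplit (cs : List Char) :
    PySem.Chars.splitOn cs ['\\'] = pvSplit cs := by
  unfold PySem.Chars.splitOn
  rw [pvGo_inv _ _ _ _ (by omega)]
  simp [pvModifyHead_id]

-- the segment pass over pvSplit reproduces the scan
def pvPartsOut : List (List Char) → List Char
  | [] => []
  | p0 :: rest => PySem.Chars.upper p0 ++ pvBParts rest

theorem pvScan_eq_partsOut (cs : List Char) : pvScan cs = pvPartsOut (pvSplit cs) := by
  induction cs using pvScan.induct with
  | case1 => simp [pvScan, pvSplit, pvPartsOut, pvBParts, PySem.Chars.upper]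
  | case2 => decide
  | case3 c2 rest2 ih =>
    obtain ⟨p0, tl, hp⟩ := pvSplit_cons_ex rest2
    have hlow : PySem.Chars.lowerChar '\\' = '\\' := by decide
    by_cases h2 : c2 = '\\'
    · subst h2
      show pvScan ('\\' :: '\\' :: rest2) = _
      rw [pvScan_cons, if_pos rfl]
      simp only [pvSplit, if_pos rfl, pvPartsOut, hp, ih]
      simp [pvBParts, PySem.Chars.upper, hlow, pvPartsOut]
    · show pvScan ('\\' :: c2 :: rest2) = _
      rw [pvScan_cons, if_pos rfl]
      simp only [pvSplit, if_pos rfl, if_neg h2, hp, List.modifyHead_cons,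
        pvPartsOut, ih]
      simp [pvBParts, PySem.Chars.upper]
  | case4 c rest hc ih =>
    obtain ⟨p0, tl, hp⟩ := pvSplit_cons_ex rest
    rw [pvScan_cons, if_neg hc]
    simp only [pvSplit, if_neg hc, hp, List.modifyHead_cons, pvPartsOut, ih, hp]
    simp [PySem.Chars.upper]

-- ===== VERDICT (by name: the statement is the Claim_ definition above) =====
theorem process_escaped_chars_spec : Claim_equal_process_escaped_chars := by
  intro text _
  unfold Spec_process_escaped_chars process_escaped_chars process_escaped_chars_alt
  rw [pvAGo_eq_pvScan_drop, List.drop_zero, splitOn_eq_pvSplit, pvScan_eq_partsOut]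
  obtain ⟨p0, tl, hp⟩ := pvSplit_cons_ex text.toList
  rw [hp]
  rfl
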